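-- pv_equiv track=rewrite | github.com/freesoil/robo_core | libs/mcap_db/db_utils.py | iter_seq
-- ===== SOURCE A (Python) =====
-- def iter_seq(msgs, every=1, skip=0, limit=None):
--     count = 0
--     recorded = 0
--     for t in msgs:
--         count += 1
--         if count <= skip:
--             continue
--         if (count - skip) % every == 0:
--             yield t
--             recorded += 1
--             if limit is not None and recorded >= limit:
--                 break
-- ===== SOURCE B (Python) =====
-- def iter_seq(msgs, every=1, skip=0, limit=None):
--     # rel = 1-based position of each message relative to the skipped prefix
--     picked = [t for rel, t in enumerate(msgs, start=1 - skip)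
--               if rel > 0 and rel % every == 0]
--     if limit is not None:
--         picked = picked[:limit]
--     yield from picked
-- ===== Notes on version B (the rewrite author's own statement) =====
-- stated objective: simpler
-- what changed: replaces A's stateful generator loop (running count, recorded counter, mid-loop break) with one comprehension over enumerate(msgs, start=1-skip) selecting the positions divisible by every, followed by a single picked[:limit] truncation; Pre_ excludes only every = 0 with a message past the skip, where A raises ZeroDivisionError
-- intended difference: On non-positive limit with at least one message selected (except the negative limits whose slice happens to leave exactly that one message), A yields the first selected message because it checks recorded >= limit only after a yield, while B truncates with picked[:limit] and so yields nothing for limit = 0, the intended meaning of a zero limit (negative limit keeps Python's slice reading). — e.g. on iter_seq([1, 2, 3], 1, 0, some 0): A returns [1], B returns []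
import Mathlib
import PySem

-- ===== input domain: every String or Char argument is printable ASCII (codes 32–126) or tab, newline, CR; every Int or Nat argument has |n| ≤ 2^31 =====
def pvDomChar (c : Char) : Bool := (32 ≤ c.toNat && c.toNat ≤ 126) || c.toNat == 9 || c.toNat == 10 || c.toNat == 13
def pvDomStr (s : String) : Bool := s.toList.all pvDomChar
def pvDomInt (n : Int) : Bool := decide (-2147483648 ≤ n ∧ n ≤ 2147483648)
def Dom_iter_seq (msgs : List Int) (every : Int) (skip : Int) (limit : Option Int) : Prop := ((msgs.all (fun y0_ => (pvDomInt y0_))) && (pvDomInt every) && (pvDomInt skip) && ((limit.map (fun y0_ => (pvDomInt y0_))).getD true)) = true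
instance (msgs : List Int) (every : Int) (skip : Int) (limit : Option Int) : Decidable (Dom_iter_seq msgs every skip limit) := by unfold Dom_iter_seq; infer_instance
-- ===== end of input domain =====

-- B replaces A's stateful generator loop (running count, recorded counter, mid-loop break)
-- with one comprehension selecting positions divisible by `every` and a single [:limit]
-- truncation; same cost, simpler shape. For non-positive limit A yields one extra message
-- (checked after the yield) while B follows the slice: stated as D_ below.
-- Both Pythons are generators; the equivalence is about the yielded sequence (list(...)).


-- ===== PORT A =====
-- A's for-loop over msgs with state (count, recorded, accumulated yields); break returns.
def iterSeqGo (every : Int) (skip : Int) (limit : Option Int) :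
    List Int → Int → Int → List Int → List Int
  | [], _, _, acc => acc.reverse
  | t :: rest, count, recorded, acc =>
    let count := count + 1
    if count ≤ skip then iterSeqGo every skip limit rest count recorded acc
    else if PySem.Int.mod (count - skip) every = 0 then
      let recorded := recorded + 1
      match limit with
      | some lim =>
        if recorded ≥ lim then (t :: acc).reverse
        else iterSeqGo every skip limit rest count recorded (t :: acc)
      | none => iterSeqGo every skip limit rest count recorded (t :: acc)
    else iterSeqGo every skip limit rest count recorded acc

def iter_seq (msgs : List Int) (every : Int) (skip : Int) (limit : Option Int) : List Int :=
  iterSeqGo every skip limit msgs 0 0 []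

-- ===== PORT B =====
-- the comprehension [t for rel, t in enumerate(msgs, start=1-skip) if rel > 0 and rel % every == 0]
def iterSeqPickB (every : Int) : List Int → Int → List Int
  | [], _ => []
  | t :: rest, rel =>
    if 0 < rel ∧ PySem.Int.mod rel every = 0 then t :: iterSeqPickB every rest (rel + 1)
    else iterSeqPickB every rest (rel + 1)

def iter_seq_alt (msgs : List Int) (every : Int) (skip : Int) (limit : Option Int) : List Int :=
  let picked := iterSeqPickB every msgs (1 - skip)
  limit.elim picked fun lim => PySem.List.slice picked none (some lim)

-- ===== PRECONDITION & SPEC =====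
-- Pre_ excludes exactly the inputs where A raises ZeroDivisionError: every = 0 while some
-- message lies past the skipped prefix (so the `% every` line is actually reached).
def Pre_iter_seq (msgs : List Int) (every : Int) (skip : Int) (limit : Option Int) : Prop :=
  every ≠ 0 ∨ (msgs.length : Int) ≤ skip
instance (msgs : List Int) (every : Int) (skip : Int) (limit : Option Int) : Decidable (Pre_iter_seq msgs every skip limit) := by unfold Pre_iter_seq; infer_instance
def pvWitness_iter_seq : List Int × Int × Int × Option Int := ([1, 2, 3, 4, 5], 2, 1, some 2)

-- For a non-positive limit A still yields the first selected message (recorded >= limit is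
-- checked only after a yield) while B truncates the selection with picked[:limit] — nothing
-- for limit = 0, the intended meaning of a zero limit (negative limit keeps Python's slice
-- reading). D_ is exactly where those two readings disagree: m = the limit, n = how many
-- messages are selected (relative positions q = 1-skip .. len-skip that are positive and
-- divisible by every); they disagree iff some message is selected and not (m < 0 with n = 1 - m).
def D_iter_seq (msgs : List Int) (every : Int) (skip : Int) (limit : Option Int) : Prop :=
  let m := limit.getD 1
  let n := (PySem.List.pyRange (1 - skip) ((msgs.length : Int) + 1 - skip) 1).countP
    (fun q => decide (0 < q ∧ every ∣ q))
  m ≤ 0 ∧ 1 ≤ n ∧ ((n : Int) ≠ 1 - m ∨ m = 0)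
instance (msgs : List Int) (every : Int) (skip : Int) (limit : Option Int) : Decidable (D_iter_seq msgs every skip limit) := by unfold D_iter_seq; infer_instance

def Spec_iter_seq (msgs : List Int) (every : Int) (skip : Int) (limit : Option Int) (out : List Int) : Prop := ¬ D_iter_seq msgs every skip limit → out = iter_seq_alt msgs every skip limit
instance (msgs : List Int) (every : Int) (skip : Int) (limit : Option Int) (out : List Int) : Decidable (Spec_iter_seq msgs every skip limit out) := by unfold Spec_iter_seq; infer_instance

def pvDiffWitness_iter_seq : List Int × Int × Int × Option Int := ([1, 2, 3], 1, 0, some 0)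
def pvDiffWitnessOut_iter_seq : (List Int) × (List Int) := ([1], [])

-- ===== CLAIM (what is proved, stated in full; the proofs are below) =====
def Claim_unchanged_iter_seq : Prop := ∀ (msgs : List Int) (every : Int) (skip : Int) (limit : Option Int), Dom_iter_seq msgs every skip limit → Pre_iter_seq msgs every skip limit → Spec_iter_seq msgs every skip limit (iter_seq msgs every skip limit)
def Claim_changed_iter_seq : Prop := Dom_iter_seq (pvDiffWitness_iter_seq.1) (pvDiffWitness_iter_seq.2.1) (pvDiffWitness_iter_seq.2.2.1) (pvDiffWitness_iter_seq.2.2.2) ∧ Pre_iter_seq (pvDiffWitness_iter_seq.1) (pvDiffWitness_iter_seq.2.1) (pvDiffWitness_iter_seq.2.2.1) (pvDiffWitness_iter_seq.2.2.2) ∧ D_iter_seq (pvDiffWitness_iter_seq.1) (pvDiffWitness_iter_seq.2.1) (pvDiffWitness_iter_seq.2.2.1) (pvDiffWitness_iter_seq.2.2.2) ∧ iter_seq (pvDiffWitness_iter_seq.1) (pvDiffWitness_iter_seq.2.1) (pvDiffWitness_iter_seq.2.2.1) (pvDiffWitness_iter_seq.2.2.2) = pvDiffWitnessOut_iter_seq.1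 ∧ iter_seq_alt (pvDiffWitness_iter_seq.1) (pvDiffWitness_iter_seq.2.1) (pvDiffWitness_iter_seq.2.2.1) (pvDiffWitness_iter_seq.2.2.2) = pvDiffWitnessOut_iter_seq.2 ∧ pvDiffWitnessOut_iter_seq.1 ≠ pvDiffWitnessOut_iter_seq.2
def Claim_exact_iter_seq : Prop := ∀ (msgs : List Int) (every : Int) (skip : Int) (limit : Option Int), Dom_iter_seq msgs every skip limit → Pre_iter_seq msgs every skip limit → D_iter_seq msgs every skip limit → iter_seq msgs every skip limit ≠ iter_seq_alt msgs every skip limit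

-- ===== LEMMAS AND PROOFS =====

-- selection of A's loop, ignoring the limit: element with running count c+1 is kept
-- iff it is past the skip prefix and (count - skip) % every == 0
def pvSel (every : Int) (skip : Int) : List Int → Int → List Int
  | [], _ => []
  | t :: rest, c =>
    if c + 1 ≤ skip then pvSel every skip rest (c + 1)
    else if PySem.Int.mod (c + 1 - skip) every = 0 then t :: pvSel every skip rest (c + 1)
    else pvSel every skip rest (c + 1)

-- truncation effect of A's post-yield limit check, from recorded-state r
def pvCap (limit : Option Int) (r : Int) (xs : List Int) : List Int :=
  match limit with
  | none => xs
  | some lim => xs.take (max (lim - r) 1).toNat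

theorem iterSeqGo_eq (every skip : Int) (limit : Option Int) :
    ∀ (l : List Int) (c r : Int) (acc : List Int),
      iterSeqGo every skip limit l c r acc = acc.reverse ++ pvCap limit r (pvSel every skip l c) := by
  intro l
  induction l with
  | nil =>
    intro c r acc
    cases limit <;> simp [iterSeqGo, pvSel, pvCap]
  | cons t rest ih =>
    intro c r acc
    simp only [iterSeqGo, pvSel]
    by_cases hsk : c + 1 ≤ skip
    · simp [hsk, ih]
    · simp only [hsk, if_false]
      by_cases hm : PySem.Int.mod (c + 1 - skip) every = 0
      · simp only [hm, if_true]
        cases limit with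
        | none => simp [pvCap, ih]
        | some lim =>
          by_cases hl : r + 1 ≥ lim
          · have h1 : (max (lim - r) 1).toNat = 1 := by omega
            simp [hl, pvCap, h1]
          · have h2 : (max (lim - r) 1).toNat = (lim - r).toNat := by omega
            have h3 : (max (lim - (r + 1)) 1).toNat = (lim - r).toNat - 1 := by omega
            have h4 : ∃ k : Nat, (lim - r).toNat = k + 1 := ⟨(lim - r).toNat - 1, by omega⟩
            obtain ⟨k, hk⟩ := h4
            simp [hl, ih, pvCap, h2, h3, hk, List.take_succ_cons]
      · simp [hm, ih]

-- A's selection equals B's comprehension: rel = c + 1 - skip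
theorem pvSel_eq_pickB (every skip : Int) :
    ∀ (l : List Int) (c : Int), pvSel every skip l c = iterSeqPickB every l (c + 1 - skip) := by
  intro l
  induction l with
  | nil => intro c; rfl
  | cons t rest ih =>
    intro c
    have hrel : c + 1 - skip + 1 = c + 1 + 1 - skip := by ring
    simp only [pvSel, iterSeqPickB]
    by_cases hsk : c + 1 ≤ skip
    · have h0 : ¬ (0 < c + 1 - skip ∧ PySem.Int.mod (c + 1 - skip) every = 0) := by
        intro h; omega
      rw [if_pos hsk, if_neg h0, hrel, ih]
    · have hpos : 0 < c + 1 - skip := by omega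
      by_cases hm : PySem.Int.mod (c + 1 - skip) every = 0
      · rw [if_neg hsk, if_pos hm, if_pos ⟨hpos, hm⟩, hrel, ih]
      · have h0 : ¬ (0 < c + 1 - skip ∧ PySem.Int.mod (c + 1 - skip) every = 0) := by
          intro h; exact hm h.2
        rw [if_neg hsk, if_neg hm, if_neg h0, hrel, ih]

-- the length of B's comprehension = D_'s count of the selected relative positions
theorem pickB_length (every : Int) :
    ∀ (l : List Int) (rel : Int),
      (iterSeqPickB every l rel).length
        = (PySem.List.pyRange rel (rel + l.length) 1).countP (fun q => decide (0 < q ∧ every ∣ q)) := by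
  intro l
  induction l with
  | nil =>
    intro rel
    simp [iterSeqPickB, PySem.List.pyRange]
  | cons t rest ih =>
    intro rel
    have hlt : rel < rel + ((t :: rest).length : Int) := by
      simp only [List.length_cons]; push_cast; omega
    have hcons := PySem.List.pyRange_one_cons hlt
    have hbound : rel + ((t :: rest).length : Int) = (rel + 1) + (rest.length : Int) := by
      simp only [List.length_cons]; push_cast; omega
    have hiff : (0 < rel ∧ PySem.Int.mod rel every = 0) ↔ (0 < rel ∧ every ∣ rel) := by
      rw [PySem.Int.mod_eq_zero_iff_dvd]
    rw [hbound] at hcons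
    by_cases h : 0 < rel ∧ every ∣ rel
    · rw [show (iterSeqPickB every (t :: rest) rel) = t :: iterSeqPickB every rest (rel + 1) from
        by rw [iterSeqPickB, if_pos (hiff.mpr h)], hbound, hcons]
      simp [h, ih]
    · rw [show (iterSeqPickB every (t :: rest) rel) = iterSeqPickB every rest (rel + 1) from
        by rw [iterSeqPickB, if_neg (fun hc => h (hiff.mp hc))], hbound, hcons]
      simp [h, ih]

-- abbreviations used by the agreement/difference proofs
theorem iter_seq_as_cap (msgs : List Int) (every skip : Int) (limit : Option Int) :
    iter_seq msgs every skip limit = pvCap limit 0 (iterSeqPickB every msgs (1 - skip)) := by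
  have hgo := iterSeqGo_eq every skip limit msgs 0 0 []
  have hsel : pvSel every skip msgs 0 = iterSeqPickB every msgs (1 - skip) := by
    have := pvSel_eq_pickB every skip msgs 0
    simpa using this
  rw [iter_seq, hgo, hsel]
  simp

theorem picked_length (msgs : List Int) (every skip : Int) :
    (iterSeqPickB every msgs (1 - skip)).length
      = (PySem.List.pyRange (1 - skip) ((msgs.length : Int) + 1 - skip) 1).countP
          (fun q => decide (0 < q ∧ every ∣ q)) := by
  have := pickB_length every msgs (1 - skip)
  rw [this]
  congr 2
  omega

theorem alt_none (msgs : List Int) (every skip : Int) :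
    iter_seq_alt msgs every skip none = iterSeqPickB every msgs (1 - skip) := rfl

theorem alt_some (msgs : List Int) (every skip lim : Int) :
    iter_seq_alt msgs every skip (some lim)
      = PySem.List.slice (iterSeqPickB every msgs (1 - skip)) none (some lim) := rfl

theorem iter_seq_eq_alt_of_not_D (msgs : List Int) (every skip : Int) (limit : Option Int)
    (hnd : ¬ D_iter_seq msgs every skip limit) :
    iter_seq msgs every skip limit = iter_seq_alt msgs every skip limit := by
  cases limit with
  | none => rw [iter_seq_as_cap, alt_none]; rfl
  | some lim =>
    rw [iter_seq_as_cap, alt_some]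
    set picked := iterSeqPickB every msgs (1 - skip) with hp
    simp only [D_iter_seq, Option.getD_some] at hnd
    rw [← picked_length msgs every skip, ← hp] at hnd
    by_cases hl : 1 ≤ lim
    · simp only [pvCap]
      have hlim : lim = ((lim.toNat : Nat) : Int) := by omega
      rw [hlim, PySem.List.slice_to_natCast]
      congr 1
      omega
    · -- lim ≤ 0 outside D_: either nothing is selected, or lim < 0 with exactly 1 - lim picks
      push Not at hnd
      have hcases := hnd (by omega)
      by_cases hn : 1 ≤ picked.length
      · obtain ⟨hne, hm0⟩ := hcases hn
        have hklt : 0 < (-lim).toNat := by omega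
        have hcap : (max (lim - 0) 1).toNat = 1 := by omega
        have hlim2 : lim = -(((-lim).toNat : Nat) : Int) := by omega
        rw [pvCap, hcap, hlim2, PySem.List.slice_to_neg_natCast _ _ hklt]
        congr 1
        omega
      · have hempty : picked = [] := by
          cases hpick : picked with
          | nil => rfl
          | cons a l => rw [hpick] at hn; simp at hn
        rw [hempty]
        simp [pvCap, PySem.List.slice]

theorem iter_seq_ne_alt_of_D (msgs : List Int) (every skip : Int) (limit : Option Int)
    (hd : D_iter_seq msgs every skip limit) :
    iter_seq msgs every skip limit ≠ iter_seq_alt msgs every skip limit := by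
  cases limit with
  | none => simp [D_iter_seq] at hd
  | some lim =>
    simp only [D_iter_seq, Option.getD_some] at hd
    rw [← picked_length msgs every skip] at hd
    obtain ⟨hm, hn, hor⟩ := hd
    intro heq
    have hlen := congrArg List.length heq
    rw [iter_seq_as_cap, alt_some] at hlen
    set picked := iterSeqPickB every msgs (1 - skip) with hp
    have hcap : (max (lim - 0) 1).toNat = 1 := by omega
    rw [pvCap, hcap] at hlen
    by_cases hm0 : lim = 0
    · rw [hm0, show (0 : Int) = ((0 : Nat) : Int) from rfl, PySem.List.slice_to_natCast] at hlen
      rw [List.length_take, List.length_take] at hlen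
      omega
    · have hne : (picked.length : Int) ≠ 1 - lim := by
        rcases hor with h | h
        · exact h
        · exact absurd h hm0
      have hklt : 0 < (-lim).toNat := by omega
      have hlim2 : lim = -(((-lim).toNat : Nat) : Int) := by omega
      have hk : (((-lim).toNat : Nat) : Int) = -lim := by omega
      rw [hlim2, PySem.List.slice_to_neg_natCast _ _ hklt] at hlen
      rw [List.length_take, List.length_take] at hlen
      omega

-- ===== VERDICT (by name: the statements are the Claim_ definitions above) =====
theorem iter_seq_spec : Claim_unchanged_iter_seq := by
  intro msgs every skip limit _ _
  unfold Spec_iter_seq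
  intro hnd
  exact iter_seq_eq_alt_of_not_D msgs every skip limit hnd

theorem iter_seq_changed : Claim_changed_iter_seq := by
  unfold Claim_changed_iter_seq; decide

theorem iter_seq_tight : Claim_exact_iter_seq := by
  intro msgs every skip limit _ _ hd
  exact iter_seq_ne_alt_of_D msgs every skip limit hd
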